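-- pv_equiv track=rewrite | github.com/Gexeg/lessons | ls25.2.py | put_parentheses
-- ===== SOURCE A (Python) =====
-- OPERATORS = {'+': (1, 'операция'), '-': (2, 'операция'),
--              '*': (3, 'операция'), '/': (4, 'операция'),
--             }
--
-- def put_parentheses(formula):
--     """расставляем скобки"""
--     prior = 4
--     stack = []
--     while prior != 0:
--         while formula:
--             element = formula.pop(0)
--             if element in OPERATORS and OPERATORS[element][0] == prior:
--                 exp = '(' + stack.pop() + element + formula.pop(0) + ')'
--                 stack.append(exp)
--                 continue
--             stack.append(element)
--         prior -= 1
--         formula = stack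
--         stack = []
--     return formula[0]
-- ===== SOURCE B (Python) =====
-- PRECEDENCE = {'+': 1, '-': 2, '*': 3, '/': 4}
--
-- def put_parentheses(formula):
--     """расставляем скобки — single-pass shunting-yard instead of one sweep per priority level"""
--     operands = []
--     operators = []
--     for token in formula:
--         if token in PRECEDENCE:
--             while operators and PRECEDENCE[operators[-1]] >= PRECEDENCE[token]:
--                 op = operators.pop()
--                 right = operands.pop()
--                 left = operands.pop()
--                 operands.append('(' + left + op + right + ')')
--             operators.append(token)
--         else:
--             operands.append(token)
--     while operators:
--         op = operators.pop()
--         right = operands.pop()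
--         left = operands.pop()
--         operands.append('(' + left + op + right + ')')
--     return operands[0]
-- ===== Notes on version B (the rewrite author's own statement) =====
-- stated objective: faster
-- what changed: Replaced A's four destructive sweeps over the token list (one per priority level, each element removed with pop(0) which shifts the whole list) by a single-pass shunting-yard parse with an operand stack and an operator stack; B also does not mutate the caller's list, while A empties it in place.
-- outside the precondition, e.g. on put_parentheses(['a', '+', 'b', 'c']): A returns '(a+b)', B returns 'a'
import Mathlib
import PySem

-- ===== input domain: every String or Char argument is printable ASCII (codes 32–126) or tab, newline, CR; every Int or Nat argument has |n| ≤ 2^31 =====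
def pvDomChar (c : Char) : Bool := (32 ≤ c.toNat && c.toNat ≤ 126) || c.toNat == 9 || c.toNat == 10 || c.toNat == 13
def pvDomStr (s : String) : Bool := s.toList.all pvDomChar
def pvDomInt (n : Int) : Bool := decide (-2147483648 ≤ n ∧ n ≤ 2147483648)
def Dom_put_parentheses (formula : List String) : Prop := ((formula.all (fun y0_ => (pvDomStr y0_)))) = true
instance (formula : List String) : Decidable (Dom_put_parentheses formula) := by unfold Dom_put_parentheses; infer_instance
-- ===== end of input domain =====

-- B replaces A's four priority-level sweeps by a single-pass shunting-yard parse (one operand stack,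
-- one operator stack); equivalence is about the RETURN value only — Python A empties the caller's list
-- in place, Python B does not mutate it.

-- shared string glue: '(' + left + op + right + ')'
def pvComb (l o r : String) : String := "(" ++ l ++ o ++ r ++ ")"

-- ===== PORT A =====
def OPERATORS : PySem.Dict String (Int × String) :=
  PySem.Dict.ofList [("+", (1, "операция")), ("-", (2, "операция")),
                     ("*", (3, "операция")), ("/", (4, "операция"))]

-- inner `while formula:` loop; `none` = IndexError from stack.pop() / formula.pop(0)
def pvPassA (prior : Int) : List String → List String → Option (List String)
  | [], stack => some stack.reverse
  | e :: rest, stack =>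
    if (match OPERATORS.get? e with | some pr => pr.1 == prior | none => false) then
      match stack, rest with
      | l :: stack', r :: rest' => pvPassA prior rest' (pvComb l e r :: stack')
      | _, _ => none
    else pvPassA prior rest (e :: stack)

def put_parentheses (formula : List String) : String :=
  (do
    let f4 ← pvPassA 4 formula []
    let f3 ← pvPassA 3 f4 []
    let f2 ← pvPassA 2 f3 []
    let f1 ← pvPassA 1 f2 []
    f1.head?).getD ""

-- ===== PORT B =====
def PRECEDENCE : PySem.Dict String Int :=
  PySem.Dict.ofList [("+", 1), ("-", 2), ("*", 3), ("/", 4)]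

-- `while operators and PRECEDENCE[operators[-1]] >= PRECEDENCE[token]`; stacks are head-first;
-- `.getD 0` is only a pattern-totaliser: every string on the operator stack is a PRECEDENCE key
def pvPopGE (p : Int) : List String → List String → Option (List String × List String)
  | opnds, [] => some (opnds, [])
  | opnds, q :: ops =>
    if (PRECEDENCE.get? q).getD 0 ≥ p then
      match opnds with
      | r :: l :: os => pvPopGE p (pvComb l q r :: os) ops
      | _ => none
    else some (opnds, q :: ops)

def pvSyLoop : List String → List String → List String → Option (List String × List String)
  | [], opnds, ops => some (opnds, ops)
  | tok :: rest, opnds, ops =>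
    match PRECEDENCE.get? tok with
    | some p =>
      match pvPopGE p opnds ops with
      | some st => pvSyLoop rest st.1 (tok :: st.2)
      | none => none
    | none => pvSyLoop rest (tok :: opnds) ops

def pvFlush : List String → List String → Option (List String)
  | opnds, [] => some opnds
  | opnds, q :: ops =>
    match opnds with
    | r :: l :: os => pvFlush (pvComb l q r :: os) ops
    | _ => none

def put_parentheses_alt (formula : List String) : String :=
  (do
    let st ← pvSyLoop formula [] []
    let fin ← pvFlush st.1 st.2
    fin.getLast?).getD ""   -- operands[0]; stacks are head-first

-- ===== PRECONDITION & SPEC =====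
def pvIsOp (s : String) : Bool := s == "+" || s == "-" || s == "*" || s == "/"

-- alternating operand/operator shape of odd length
def pvWF : List String → Bool
  | [] => false
  | [t] => !pvIsOp t
  | t :: o :: rest => !pvIsOp t && pvIsOp o && pvWF rest

-- Pre_ admits operator-free token lists and well-formed alternating formulas; it excludes the empty
-- list and malformed operator placements, on which A either raises IndexError (pop on an exhausted
-- list) or returns a partially-reduced leftover token that is an accident of no specified meaning.
def Pre_put_parentheses (formula : List String) : Prop :=
  (formula ≠ [] ∧ ∀ t ∈ formula, pvIsOp t = false) ∨ pvWF formula = true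

instance (formula : List String) : Decidable (Pre_put_parentheses formula) := by
  unfold Pre_put_parentheses; infer_instance

def pvWitness_put_parentheses : List String := ["a", "+", "b", "*", "c"]

def Spec_put_parentheses (formula : List String) (out : String) : Prop := out = put_parentheses_alt formula
instance (formula : List String) (out : String) : Decidable (Spec_put_parentheses formula out) := by unfold Spec_put_parentheses; infer_instance

-- ===== CLAIM (what is proved, stated in full; the proofs are below) =====
def Claim_equal_put_parentheses : Prop := ∀ (formula : List String), Dom_put_parentheses formula → Pre_put_parentheses formula → Spec_put_parentheses formula (put_parentheses formula)

-- ===== LEMMAS AND PROOFS =====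

-- priority of an operator token (0 for non-operators)
def pvPrio (s : String) : Int :=
  if s == "+" then 1 else if s == "-" then 2 else if s == "*" then 3 else if s == "/" then 4 else 0

-- structured view of a well-formed formula: head operand + (operator, operand) pairs
def pvFlat : List (String × String) → List String
  | [] => []
  | (o, u) :: P => o :: u :: pvFlat P

def pvGoodP (P : List (String × String)) : Prop :=
  ∀ x ∈ P, pvIsOp x.1 = true ∧ pvIsOp x.2 = false

-- spec-level single priority sweep over the structured formula
def pvPassP (p : Int) : String → List (String × String) → String × List (String × String)
  | t, [] => (t, [])
  | t, (o, u) :: P =>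
    if pvPrio o = p then pvPassP p (pvComb t o u) P
    else (t, (o, (pvPassP p u P).1) :: (pvPassP p u P).2)

def pvMultiFrom : Nat → String → List (String × String) → String
  | 0, t, _ => t
  | n + 1, t, P => pvMultiFrom n (pvPassP ((n : Int) + 1) t P).1 (pvPassP ((n : Int) + 1) t P).2

def pvMulti (t : String) (P : List (String × String)) : String := pvMultiFrom 4 t P

def pvHeadLe (P : List (String × String)) (m : Int) : Prop :=
  ∀ o u P', P = (o, u) :: P' → pvPrio o ≤ m

def pvHeadNe (P : List (String × String)) (p : Int) : Prop :=
  ∀ o u P', P = (o, u) :: P' → pvPrio o ≠ p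

-- chain of the two stacks (head = top) back into pairs, bottom-to-top
def pvChain : List String → List String → List (String × String)
  | e :: es, q :: ops => pvChain es ops ++ [(q, e)]
  | _, _ => []

-- basic facts -----------------------------------------------------------------

theorem pv_isOp_prio {s : String} (h : pvIsOp s = true) : 1 ≤ pvPrio s ∧ pvPrio s ≤ 4 := by
  simp only [pvIsOp, Bool.or_eq_true, beq_iff_eq] at h
  rcases h with ((h | h) | h) | h <;> subst h <;> decide

theorem pv_isOp_comb (l o r : String) : pvIsOp (pvComb l o r) = false := by
  have hco : (pvComb l o r).toList = '(' :: (l.toList ++ o.toList ++ r.toList ++ [')']) := by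
    simp [pvComb]
  simp only [pvIsOp, Bool.or_eq_false_iff]
  refine ⟨⟨⟨?_, ?_⟩, ?_⟩, ?_⟩ <;>
    (rw [beq_eq_false_iff_ne]; intro hh; rw [← String.toList_inj] at hh; simp [hco] at hh)

theorem pv_opGet (e : String) :
    OPERATORS.get? e =
      (if e == "+" then some ((1 : Int), "операция") else
       if e == "-" then some (2, "операция") else
       if e == "*" then some (3, "операция") else
       if e == "/" then some (4, "операция") else none) := by
  by_cases h1 : e = "+"; · subst h1; rfl
  by_cases h2 : e = "-"; · subst h2; rfl
  by_cases h3 : e = "*"; · subst h3; rfl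
  by_cases h4 : e = "/"; · subst h4; rfl
  have e1 : ("+" == e) = false := beq_eq_false_iff_ne.mpr (Ne.symm h1)
  have e2 : ("-" == e) = false := beq_eq_false_iff_ne.mpr (Ne.symm h2)
  have e3 : ("*" == e) = false := beq_eq_false_iff_ne.mpr (Ne.symm h3)
  have e4 : ("/" == e) = false := beq_eq_false_iff_ne.mpr (Ne.symm h4)
  show (PySem.Dict.mk [("+", ((1 : Int), "операция")), ("-", (2, "операция")),
        ("*", (3, "операция")), ("/", (4, "операция"))]).get? e = _
  simp [PySem.Dict.get?, List.find?, e1, e2, e3, e4, h1, h2, h3, h4]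

theorem pv_condA (e : String) (p : Int) :
    (match OPERATORS.get? e with | some pr => pr.1 == p | none => false)
      = (pvIsOp e && pvPrio e == p) := by
  rw [pv_opGet]
  by_cases h1 : e = "+"; · subst h1; rfl
  by_cases h2 : e = "-"; · subst h2; rfl
  by_cases h3 : e = "*"; · subst h3; rfl
  by_cases h4 : e = "/"; · subst h4; rfl
  simp [pvIsOp, pvPrio, h1, h2, h3, h4]

theorem pv_passA_push (p : Int) (e : String) (rest stack : List String)
    (hcond : (match OPERATORS.get? e with | some pr => pr.1 == p | none => false) = false) :
    pvPassA p (e :: rest) stack = pvPassA p rest (e :: stack) := by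
  have hneg : ¬((match OPERATORS.get? e with | some pr => pr.1 == p | none => false) = true) := by
    simp [hcond]
  cases stack with
  | nil => rw [pvPassA.eq_3 p [] e rest (by intro l s' r r' h; cases h), if_neg hneg]
  | cons l stack' =>
    cases rest with
    | nil => rw [pvPassA.eq_3 p (l :: stack') e [] (by intro a b c d _ h; cases h), if_neg hneg]
    | cons r rest' => rw [pvPassA.eq_2, if_neg hneg]

theorem pv_precLookup (s : String) :
    PRECEDENCE.get? s = if pvIsOp s then some (pvPrio s) else none := by
  by_cases h1 : s = "+"; · subst h1; rfl
  by_cases h2 : s = "-"; · subst h2; rfl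
  by_cases h3 : s = "*"; · subst h3; rfl
  by_cases h4 : s = "/"; · subst h4; rfl
  have e1 : ("+" == s) = false := beq_eq_false_iff_ne.mpr (Ne.symm h1)
  have e2 : ("-" == s) = false := beq_eq_false_iff_ne.mpr (Ne.symm h2)
  have e3 : ("*" == s) = false := beq_eq_false_iff_ne.mpr (Ne.symm h3)
  have e4 : ("/" == s) = false := beq_eq_false_iff_ne.mpr (Ne.symm h4)
  have hop : pvIsOp s = false := by simp [pvIsOp, h1, h2, h3, h4]
  show (PySem.Dict.mk [("+", (1 : Int)), ("-", 2), ("*", 3), ("/", 4)]).get? s = _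
  simp [PySem.Dict.get?, List.find?, e1, e2, e3, e4, hop]

theorem pv_multiFrom_nil : ∀ (n : Nat) (t : String), pvMultiFrom n t [] = t := by
  intro n; induction n with
  | zero => intro t; rfl
  | succ n ih => intro t; simp [pvMultiFrom, pvPassP, ih]

-- pass lemmas -----------------------------------------------------------------

def pvTail (p : Int) : List (String × String) → List (String × String)
  | [] => []
  | (o, u) :: P => (o, (pvPassP p u P).1) :: (pvPassP p u P).2

theorem pv_passFrozen (p : Int) :
    ∀ (Q : List (String × String)) (t : String) (P : List (String × String)),
      (∀ x ∈ Q, pvPrio x.1 ≠ p) → pvHeadNe P p →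
      pvPassP p t (Q ++ P) = (t, Q ++ pvTail p P) := by
  intro Q
  induction Q with
  | nil =>
    intro t P _ hne
    cases P with
    | nil => rfl
    | cons hd P' =>
      obtain ⟨o, u⟩ := hd
      have ho := hne o u P' rfl
      simp [pvPassP, pvTail, ho]
  | cons x Q ih =>
    obtain ⟨o, l⟩ := x
    intro t P hQ hne
    have ho : pvPrio o ≠ p := hQ (o, l) (by simp)
    have := ih l P (fun y hy => hQ y (by simp [hy])) hne
    simp [pvPassP, ho, this]

theorem pv_passSkip (p : Int) :
    ∀ (Q : List (String × String)) (t o l : String) (R : List (String × String)),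
      (∀ x ∈ Q, pvPrio x.1 ≠ p) → pvPrio o ≠ p →
      pvPassP p t (Q ++ (o, l) :: R)
        = (t, Q ++ (o, (pvPassP p l R).1) :: (pvPassP p l R).2) := by
  intro Q
  induction Q with
  | nil =>
    intro t o l R _ ho
    simp [pvPassP, ho]
  | cons x Q ih =>
    obtain ⟨o', l'⟩ := x
    intro t o l R hQ ho
    have ho' : pvPrio o' ≠ p := hQ (o', l') (by simp)
    have := ih l' o l R (fun y hy => hQ y (by simp [hy])) ho
    simp [pvPassP, ho', this]

theorem pv_tail_headLe (p : Int) (P : List (String × String)) (m : Int) (h : pvHeadLe P m) :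
    pvHeadLe (pvTail p P) m := by
  cases P with
  | nil => intro o u P' hh; simp [pvTail] at hh
  | cons hd P' =>
    obtain ⟨o, u⟩ := hd
    intro o' u' P'' hh
    simp [pvTail] at hh
    obtain ⟨⟨ho1, -⟩, -⟩ := hh
    subst ho1
    exact h o u P' rfl

-- key reduction lemmas: combining the top of an ascending chain early does not change the result ---

theorem pv_Lgen0 : ∀ (n : Nat) (t q e : String) (P : List (String × String)),
    1 ≤ pvPrio q → pvPrio q ≤ (n : Int) → pvHeadLe P (pvPrio q) →
    pvMultiFrom n t ((q, e) :: P) = pvMultiFrom n (pvComb t q e) P := by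
  intro n
  induction n with
  | zero => intro t q e P h1 h2 _; simp at h2; omega
  | succ n ih =>
    intro t q e P h1 h2 hle
    by_cases hq : pvPrio q = (n : Int) + 1
    · have hstep : pvPassP ((n : Int) + 1) t ((q, e) :: P)
          = pvPassP ((n : Int) + 1) (pvComb t q e) P := by
        simp [pvPassP, hq]
      simp only [pvMultiFrom, hstep]
    · have h2' : pvPrio q ≤ (n : Int) := by push_cast at h2; omega
      have hPne : pvHeadNe P ((n : Int) + 1) := by
        intro o u P' hP'
        have := hle o u P' hP'
        omega
      have L : pvPassP ((n : Int) + 1) t ((q, e) :: P)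
          = (t, (q, e) :: pvTail ((n : Int) + 1) P) := by
        have := pv_passFrozen ((n : Int) + 1) [(q, e)] t P
          (by intro x hx; simp at hx; subst hx; exact hq) hPne
        simpa using this
      have R : pvPassP ((n : Int) + 1) (pvComb t q e) P
          = (pvComb t q e, pvTail ((n : Int) + 1) P) := by
        have := pv_passFrozen ((n : Int) + 1) [] (pvComb t q e) P (by simp) hPne
        simpa using this
      simp only [pvMultiFrom, L, R]
      exact ih t q e (pvTail ((n : Int) + 1) P) h1 h2'
        (pv_tail_headLe ((n : Int) + 1) P (pvPrio q) hle)

theorem pv_Lgen1 : ∀ (n : Nat) (t : String) (Q : List (String × String)) (o l q e : String)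
    (P : List (String × String)),
    (∀ x ∈ Q, pvPrio x.1 < pvPrio q) → pvPrio o < pvPrio q →
    1 ≤ pvPrio q → pvPrio q ≤ (n : Int) → pvHeadLe P (pvPrio q) →
    pvMultiFrom n t (Q ++ (o, l) :: (q, e) :: P)
      = pvMultiFrom n t (Q ++ (o, pvComb l q e) :: P) := by
  intro n
  induction n with
  | zero => intro t Q o l q e P _ _ h1 h2 _; simp at h2; omega
  | succ n ih =>
    intro t Q o l q e P hQ ho h1 h2 hle
    by_cases hq : pvPrio q = (n : Int) + 1
    · have hQne : ∀ x ∈ Q, pvPrio x.1 ≠ (n : Int) + 1 := by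
        intro x hx; have := hQ x hx; omega
      have hone : pvPrio o ≠ (n : Int) + 1 := by omega
      have L := pv_passSkip ((n : Int) + 1) Q t o l ((q, e) :: P) hQne hone
      have R := pv_passSkip ((n : Int) + 1) Q t o (pvComb l q e) P hQne hone
      have hstep : pvPassP ((n : Int) + 1) l ((q, e) :: P)
          = pvPassP ((n : Int) + 1) (pvComb l q e) P := by
        simp [pvPassP, hq]
      rw [hstep] at L
      simp only [pvMultiFrom, L, R]
    · have h2' : pvPrio q ≤ (n : Int) := by push_cast at h2; omega
      have hone : pvPrio o ≠ (n : Int) + 1 := by omega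
      have hPne : pvHeadNe P ((n : Int) + 1) := by
        intro o' u' P' hP'
        have := hle o' u' P' hP'
        omega
      have hQne1 : ∀ x ∈ Q ++ [(o, l), (q, e)], pvPrio x.1 ≠ (n : Int) + 1 := by
        intro x hx
        rcases List.mem_append.mp hx with hx | hx
        · have := hQ x hx; omega
        · simp at hx
          rcases hx with hx | hx <;> subst hx
          · exact hone
          · exact hq
      have hQne2 : ∀ x ∈ Q ++ [(o, pvComb l q e)], pvPrio x.1 ≠ (n : Int) + 1 := by
        intro x hx
        rcases List.mem_append.mp hx with hx | hx
        · have := hQ x hx; omega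
        · simp at hx; subst hx; exact hone
      have L : pvPassP ((n : Int) + 1) t (Q ++ (o, l) :: (q, e) :: P)
          = (t, (Q ++ [(o, l), (q, e)]) ++ pvTail ((n : Int) + 1) P) := by
        rw [show Q ++ (o, l) :: (q, e) :: P = (Q ++ [(o, l), (q, e)]) ++ P by simp]
        exact pv_passFrozen ((n : Int) + 1) (Q ++ [(o, l), (q, e)]) t P hQne1 hPne
      have R : pvPassP ((n : Int) + 1) t (Q ++ (o, pvComb l q e) :: P)
          = (t, (Q ++ [(o, pvComb l q e)]) ++ pvTail ((n : Int) + 1) P) := by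
        rw [show Q ++ (o, pvComb l q e) :: P = (Q ++ [(o, pvComb l q e)]) ++ P by simp]
        exact pv_passFrozen ((n : Int) + 1) (Q ++ [(o, pvComb l q e)]) t P hQne2 hPne
      simp only [pvMultiFrom, L, R]
      have := ih t Q o l q e (pvTail ((n : Int) + 1) P) hQ ho h1 h2'
        (pv_tail_headLe ((n : Int) + 1) P (pvPrio q) hle)
      simpa [List.append_assoc] using this

-- chain facts -----------------------------------------------------------------
theorem pv_chain_fst_mem : ∀ (es ops : List String), es.length = ops.length →
    ∀ x ∈ pvChain es ops, x.1 ∈ ops := by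
  intro es
  induction es with
  | nil => intro ops _ x hx; simp [pvChain] at hx
  | cons e es ih =>
    intro ops hlen x hx
    cases ops with
    | nil => simp at hlen
    | cons q ops =>
      simp only [pvChain, List.mem_append] at hx
      rcases hx with hx | hx
      · exact List.mem_cons_of_mem q (ih ops (by simpa using hlen) x hx)
      · simp at hx; subst hx; simp

-- pop loop --------------------------------------------------------------------

theorem pv_popGE (p0 : Int) :
    ∀ (ops es : List String) (t0 : String),
      es.length = ops.length → (∀ q ∈ ops, pvIsOp q = true) →
      List.Pairwise (fun a b => pvPrio b < pvPrio a) ops →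
      ∃ es' ops' t0',
        pvPopGE p0 (es ++ [t0]) ops = some (es' ++ [t0'], ops') ∧
        es'.length = ops'.length ∧ (∀ q ∈ ops', pvIsOp q = true) ∧
        List.Pairwise (fun a b => pvPrio b < pvPrio a) ops' ∧
        (∀ q ∈ ops', pvPrio q < p0) ∧
        (∀ T, pvHeadLe T p0 →
          pvMulti t0 (pvChain es ops ++ T) = pvMulti t0' (pvChain es' ops' ++ T)) := by
  intro ops
  induction ops with
  | nil =>
    intro es t0 hlen _ _
    have hes : es = [] := List.eq_nil_of_length_eq_zero (by simpa using hlen)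
    subst hes
    exact ⟨[], [], t0, by simp [pvPopGE], rfl, by simp, by simp, by simp, fun T _ => rfl⟩
  | cons q ops2 ih =>
    intro es t0 hlen hops hasc
    have hq : pvIsOp q = true := hops q (by simp)
    have hqp := pv_isOp_prio hq
    have hget : (PRECEDENCE.get? q).getD 0 = pvPrio q := by rw [pv_precLookup]; simp [hq]
    cases es with
    | nil => simp at hlen
    | cons e es2 =>
      have hlen2 : es2.length = ops2.length := by simpa using hlen
      by_cases hge : p0 ≤ pvPrio q
      · cases es2 with
        | nil =>
          have hops2 : ops2 = [] := List.eq_nil_of_length_eq_zero hlen2.symm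
          subst hops2
          refine ⟨[], [], pvComb t0 q e, ?_, rfl, by simp, by simp, by simp, ?_⟩
          · show pvPopGE p0 ([e] ++ [t0]) [q] = some ([] ++ [pvComb t0 q e], [])
            simp [pvPopGE, hget, hge]
          · intro T hT
            have hTle : pvHeadLe T (pvPrio q) := fun o u P' h => le_trans (hT o u P' h) hge
            have := pv_Lgen0 4 t0 q e T hqp.1 (by push_cast; omega) hTle
            simpa [pvChain, pvMulti] using this
        | cons l es3 =>
          cases ops2 with
          | nil => simp at hlen2
          | cons o2 ops3 =>
            have hasc2 : List.Pairwise (fun a b => pvPrio b < pvPrio a) (o2 :: ops3) :=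
              (List.pairwise_cons.mp hasc).2
            have hqgt : ∀ b ∈ o2 :: ops3, pvPrio b < pvPrio q :=
              fun b hb => (List.pairwise_cons.mp hasc).1 b hb
            obtain ⟨es', ops', t0', hrun, h1, h2, h3, h4, hinv⟩ :=
              ih (pvComb l q e :: es3) t0 (by simpa using hlen2)
                (fun q' hq' => hops q' (List.mem_cons_of_mem _ hq')) hasc2
            refine ⟨es', ops', t0', ?_, h1, h2, h3, h4, ?_⟩
            · show pvPopGE p0 ((e :: l :: es3) ++ [t0]) (q :: o2 :: ops3) = _
              rw [show (e :: l :: es3) ++ [t0] = e :: l :: (es3 ++ [t0]) by simp]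
              simpa [pvPopGE, hget, hge] using hrun
            · intro T hT
              have hTle : pvHeadLe T (pvPrio q) := fun o u P' h => le_trans (hT o u P' h) hge
              have hQchain : ∀ x ∈ pvChain es3 ops3, pvPrio x.1 < pvPrio q := by
                intro x hx
                exact hqgt x.1
                  (List.mem_cons_of_mem _ (pv_chain_fst_mem es3 ops3 (by simpa using hlen2) x hx))
              have ho2 : pvPrio o2 < pvPrio q := hqgt o2 (by simp)
              have step := pv_Lgen1 4 t0 (pvChain es3 ops3) o2 l q e T hQchain ho2 hqp.1
                (by push_cast; omega) hTle
              have e1 : pvChain (e :: l :: es3) (q :: o2 :: ops3)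
                  = (pvChain es3 ops3 ++ [(o2, l)]) ++ [(q, e)] := by simp [pvChain]
              have e2 : pvChain (pvComb l q e :: es3) (o2 :: ops3)
                  = pvChain es3 ops3 ++ [(o2, pvComb l q e)] := by simp [pvChain]
              rw [← hinv T hT, e1, e2]
              simpa [pvMulti, List.append_assoc] using step
      · refine ⟨e :: es2, q :: ops2, t0, ?_, hlen, hops, hasc, ?_, fun T _ => rfl⟩
        · simp [pvPopGE, hget, hge]
        · intro q' hq'
          rcases List.mem_cons.mp hq' with h | h
          · subst h; omega
          · have := (List.pairwise_cons.mp hasc).1 q' h; omega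

-- flush -----------------------------------------------------------------------

theorem pv_flush : ∀ (ops es : List String) (t0 : String),
    es.length = ops.length → (∀ q ∈ ops, pvIsOp q = true) →
    List.Pairwise (fun a b => pvPrio b < pvPrio a) ops →
    pvFlush (es ++ [t0]) ops = some [pvMulti t0 (pvChain es ops)] := by
  intro ops
  induction ops with
  | nil =>
    intro es t0 hlen _ _
    have hes : es = [] := List.eq_nil_of_length_eq_zero (by simpa using hlen)
    subst hes
    simp [pvFlush, pvChain, pvMulti, pv_multiFrom_nil]
  | cons q ops2 ih =>
    intro es t0 hlen hops hasc
    have hq : pvIsOp q = true := hops q (by simp)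
    have hqp := pv_isOp_prio hq
    cases es with
    | nil => simp at hlen
    | cons e es2 =>
      have hlen2 : es2.length = ops2.length := by simpa using hlen
      cases es2 with
      | nil =>
        have hops2 : ops2 = [] := List.eq_nil_of_length_eq_zero hlen2.symm
        subst hops2
        have := pv_Lgen0 4 t0 q e [] hqp.1 (by push_cast; omega) (by intro o u P' h; simp at h)
        simp [pvFlush, pvChain, pvMulti, this, pv_multiFrom_nil]
      | cons l es3 =>
        cases ops2 with
        | nil => simp at hlen2
        | cons o2 ops3 =>
          have hasc2 : List.Pairwise (fun a b => pvPrio b < pvPrio a) (o2 :: ops3) :=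
            (List.pairwise_cons.mp hasc).2
          have hqgt : ∀ b ∈ o2 :: ops3, pvPrio b < pvPrio q :=
            fun b hb => (List.pairwise_cons.mp hasc).1 b hb
          have hQchain : ∀ x ∈ pvChain es3 ops3, pvPrio x.1 < pvPrio q := by
            intro x hx
            exact hqgt x.1
              (List.mem_cons_of_mem _ (pv_chain_fst_mem es3 ops3 (by simpa using hlen2) x hx))
          have ho2 : pvPrio o2 < pvPrio q := hqgt o2 (by simp)
          have step := pv_Lgen1 4 t0 (pvChain es3 ops3) o2 l q e [] hQchain ho2 hqp.1
            (by push_cast; omega) (by intro o u P' h; simp at h)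
          have hrec := ih (pvComb l q e :: es3) t0 (by simpa using hlen2)
            (fun q' hq' => hops q' (List.mem_cons_of_mem _ hq')) hasc2
          rw [show (e :: l :: es3) ++ [t0] = e :: l :: (es3 ++ [t0]) by simp]
          show pvFlush (e :: l :: (es3 ++ [t0])) (q :: o2 :: ops3) = _
          rw [show pvFlush (e :: l :: (es3 ++ [t0])) (q :: o2 :: ops3)
              = pvFlush ((pvComb l q e :: es3) ++ [t0]) (o2 :: ops3) by simp [pvFlush]]
          rw [hrec]
          have e1 : pvChain (e :: l :: es3) (q :: o2 :: ops3)
              = (pvChain es3 ops3 ++ [(o2, l)]) ++ [(q, e)] := by simp [pvChain]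
          have e2 : pvChain (pvComb l q e :: es3) (o2 :: ops3)
              = pvChain es3 ops3 ++ [(o2, pvComb l q e)] := by simp [pvChain]
          rw [e1, e2]
          have : pvMulti t0 ((pvChain es3 ops3 ++ [(o2, l)]) ++ [(q, e)])
              = pvMulti t0 (pvChain es3 ops3 ++ [(o2, pvComb l q e)]) := by
            simpa [pvMulti, List.append_assoc] using step
          rw [this]

-- main shunting-yard invariant -------------------------------------------------

theorem pv_syMain : ∀ (P : List (String × String)) (es ops : List String) (t0 : String),
    pvGoodP P → es.length = ops.length → (∀ q ∈ ops, pvIsOp q = true) →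
    List.Pairwise (fun a b => pvPrio b < pvPrio a) ops →
    ((pvSyLoop (pvFlat P) (es ++ [t0]) ops).bind
        (fun st => (pvFlush st.1 st.2).bind List.getLast?))
      = some (pvMulti t0 (pvChain es ops ++ P)) := by
  intro P
  induction P with
  | nil =>
    intro es ops t0 _ hlen hops hasc
    show ((pvSyLoop [] (es ++ [t0]) ops).bind _) = _
    rw [show pvSyLoop [] (es ++ [t0]) ops = some (es ++ [t0], ops) from rfl,
        Option.bind_some, pv_flush ops es t0 hlen hops hasc]
    simp
  | cons hd P' ih =>
    obtain ⟨o, u⟩ := hd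
    intro es ops t0 hgood hlen hops hasc
    have ho : pvIsOp o = true := (hgood (o, u) (by simp)).1
    have hu : pvIsOp u = false := (hgood (o, u) (by simp)).2
    obtain ⟨es', ops', t0', hrun, h1, h2, h3, h4, hinv⟩ :=
      pv_popGE (pvPrio o) ops es t0 hlen hops hasc
    have hgetu : PRECEDENCE.get? u = none := by rw [pv_precLookup]; simp [hu]
    have hgeto : PRECEDENCE.get? o = some (pvPrio o) := by rw [pv_precLookup]; simp [ho]
    have hstep : pvSyLoop (pvFlat ((o, u) :: P')) (es ++ [t0]) ops
        = pvSyLoop (pvFlat P') ((u :: es') ++ [t0']) (o :: ops') := by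
      show pvSyLoop (o :: u :: pvFlat P') (es ++ [t0]) ops = _
      simp [pvSyLoop, hgeto, hrun, hgetu]
    rw [hstep]
    have hmain := ih (u :: es') (o :: ops') t0'
      (fun x hx => hgood x (List.mem_cons_of_mem _ hx))
      (by simp [h1])
      (by intro q hq
          rcases List.mem_cons.mp hq with h | h
          · subst h; exact ho
          · exact h2 q h)
      (List.pairwise_cons.mpr ⟨fun b hb => h4 b hb, h3⟩)
    rw [hmain]
    have e1 : pvChain (u :: es') (o :: ops') = pvChain es' ops' ++ [(o, u)] := by
      simp [pvChain]
    have hinv' := hinv ((o, u) :: P') (by intro o' u' P'' h; cases h; exact le_refl _)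
    rw [e1, List.append_assoc]
    exact congrArg some hinv'.symm

-- A-side structured simulation -------------------------------------------------

theorem pv_passP_good (p : Int) : ∀ (P : List (String × String)) (t : String),
    pvGoodP P → pvIsOp t = false →
    pvIsOp (pvPassP p t P).1 = false ∧ pvGoodP (pvPassP p t P).2 := by
  intro P
  induction P with
  | nil => intro t _ ht; exact ⟨by simpa [pvPassP] using ht, fun x hx => by simp [pvPassP] at hx⟩
  | cons hd P' ih =>
    obtain ⟨o, u⟩ := hd
    intro t hg ht
    have ho : pvIsOp o = true := (hg (o, u) (by simp)).1
    have hu : pvIsOp u = false := (hg (o, u) (by simp)).2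
    have hg' : pvGoodP P' := fun x hx => hg x (List.mem_cons_of_mem _ hx)
    by_cases hp : pvPrio o = p
    · simpa [pvPassP, hp] using ih (pvComb t o u) hg' (pv_isOp_comb t o u)
    · have hih := ih u hg' hu
      constructor
      · simpa [pvPassP, hp] using ht
      · intro x hx
        simp [pvPassP, hp] at hx
        rcases hx with hx | hx
        · subst hx; exact ⟨ho, hih.1⟩
        · exact hih.2 x hx

theorem pv_passA_sim (p : Int) : ∀ (P : List (String × String)) (t : String) (stk : List String),
    pvGoodP P → pvIsOp t = false →
    pvPassA p (pvFlat P) (t :: stk)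
      = some (stk.reverse ++ (pvPassP p t P).1 :: pvFlat (pvPassP p t P).2) := by
  intro P
  induction P with
  | nil => intro t stk _ _; simp [pvFlat, pvPassA, pvPassP]
  | cons hd P' ih =>
    obtain ⟨o, u⟩ := hd
    intro t stk hg ht
    have ho : pvIsOp o = true := (hg (o, u) (by simp)).1
    have hu : pvIsOp u = false := (hg (o, u) (by simp)).2
    have hg' : pvGoodP P' := fun x hx => hg x (List.mem_cons_of_mem _ hx)
    by_cases hp : pvPrio o = p
    · have hcond : (match OPERATORS.get? o with | some pr => pr.1 == p | none => false) = true := by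
        rw [pv_condA]; simp [ho, hp]
      have h0 : pvPassA p (o :: u :: pvFlat P') (t :: stk)
          = pvPassA p (pvFlat P') (pvComb t o u :: stk) := by
        simp [pvPassA, hcond]
      show pvPassA p (o :: u :: pvFlat P') (t :: stk) = _
      rw [h0, ih (pvComb t o u) stk hg' (pv_isOp_comb t o u)]
      simp [pvPassP, hp]
    · have hcond : (match OPERATORS.get? o with | some pr => pr.1 == p | none => false) = false := by
        rw [pv_condA]; simp [hp]
      have hcondu : (match OPERATORS.get? u with | some pr => pr.1 == p | none => false) = false := by
        rw [pv_condA]; simp [hu]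
      show pvPassA p (o :: u :: pvFlat P') (t :: stk) = _
      rw [pv_passA_push p o (u :: pvFlat P') (t :: stk) hcond,
          pv_passA_push p u (pvFlat P') (o :: t :: stk) hcondu,
          ih u (o :: t :: stk) hg' hu]
      simp [pvPassP, hp, pvFlat]

-- operator-free case -----------------------------------------------------------

theorem pv_passA_noop (p : Int) : ∀ (l stk : List String),
    (∀ x ∈ l, pvIsOp x = false) → pvPassA p l stk = some (stk.reverse ++ l) := by
  intro l
  induction l with
  | nil => intro stk _; simp [pvPassA]
  | cons x l ih =>
    intro stk h
    have hx : pvIsOp x = false := h x (by simp)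
    have hcond : (match OPERATORS.get? x with | some pr => pr.1 == p | none => false) = false := by
      rw [pv_condA]; simp [hx]
    rw [pv_passA_push p x l stk hcond, ih (x :: stk) (fun y hy => h y (List.mem_cons_of_mem _ hy))]
    simp

theorem pv_syLoop_noop : ∀ (l opnds : List String),
    (∀ x ∈ l, pvIsOp x = false) → pvSyLoop l opnds [] = some (l.reverse ++ opnds, []) := by
  intro l
  induction l with
  | nil => intro opnds _; simp [pvSyLoop]
  | cons x l ih =>
    intro opnds h
    have hx : pvIsOp x = false := h x (by simp)
    have hget : PRECEDENCE.get? x = none := by rw [pv_precLookup]; simp [hx]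
    have h0 : pvSyLoop (x :: l) opnds [] = pvSyLoop l (x :: opnds) [] := by
      simp [pvSyLoop, hget]
    rw [h0, ih (x :: opnds) (fun y hy => h y (List.mem_cons_of_mem _ hy))]
    simp

-- well-formedness gives the structured view -------------------------------------

theorem pv_wf_struct : ∀ (l : List String), pvWF l = true →
    ∃ t P, l = t :: pvFlat P ∧ pvIsOp t = false ∧ pvGoodP P := by
  intro l
  induction l using pvWF.induct with
  | case1 => intro h; simp [pvWF] at h
  | case2 t => intro h; exact ⟨t, [], by simp [pvFlat], by simpa [pvWF] using h, fun x hx => by simp at hx⟩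
  | case3 t o rest ih =>
    intro h
    simp only [pvWF, Bool.and_eq_true, Bool.not_eq_true'] at h
    obtain ⟨⟨ht, ho⟩, hrest⟩ := h
    obtain ⟨t', P', heq, ht', hg'⟩ := ih hrest
    refine ⟨t, (o, t') :: P', by simp [pvFlat, heq], ht, ?_⟩
    intro x hx
    rcases List.mem_cons.mp hx with hx | hx
    · subst hx; exact ⟨ho, ht'⟩
    · exact hg' x hx

-- putting A together -----------------------------------------------------------

theorem pv_A_step (p : Int) (t : String) (P : List (String × String))
    (hg : pvGoodP P) (ht : pvIsOp t = false) :
    pvPassA p (t :: pvFlat P) [] = some ((pvPassP p t P).1 :: pvFlat (pvPassP p t P).2) := by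
  have hcond : (match OPERATORS.get? t with | some pr => pr.1 == p | none => false) = false := by
    rw [pv_condA]; simp [ht]
  rw [pv_passA_push p t (pvFlat P) [] hcond, pv_passA_sim p P t [] hg ht]
  simp

theorem pv_A_wf (t : String) (P : List (String × String)) (ht : pvIsOp t = false)
    (hP : pvGoodP P) : put_parentheses (t :: pvFlat P) = pvMulti t P := by
  obtain ⟨h4f, h4g⟩ := pv_passP_good 4 P t hP ht
  obtain ⟨h3f, h3g⟩ := pv_passP_good 3 (pvPassP 4 t P).2 (pvPassP 4 t P).1 h4g h4f
  obtain ⟨h2f, h2g⟩ := pv_passP_good 2 (pvPassP 3 (pvPassP 4 t P).1 (pvPassP 4 t P).2).2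
    (pvPassP 3 (pvPassP 4 t P).1 (pvPassP 4 t P).2).1 h3g h3f
  have e4 := pv_A_step 4 t P hP ht
  have e3 := pv_A_step 3 (pvPassP 4 t P).1 (pvPassP 4 t P).2 h4g h4f
  have e2 := pv_A_step 2 (pvPassP 3 (pvPassP 4 t P).1 (pvPassP 4 t P).2).1
    (pvPassP 3 (pvPassP 4 t P).1 (pvPassP 4 t P).2).2 h3g h3f
  have e1 := pv_A_step 1
    (pvPassP 2 (pvPassP 3 (pvPassP 4 t P).1 (pvPassP 4 t P).2).1
      (pvPassP 3 (pvPassP 4 t P).1 (pvPassP 4 t P).2).2).1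
    (pvPassP 2 (pvPassP 3 (pvPassP 4 t P).1 (pvPassP 4 t P).2).1
      (pvPassP 3 (pvPassP 4 t P).1 (pvPassP 4 t P).2).2).2 h2g h2f
  have hmulti : pvMulti t P
      = (pvPassP 1 (pvPassP 2 (pvPassP 3 (pvPassP 4 t P).1 (pvPassP 4 t P).2).1
          (pvPassP 3 (pvPassP 4 t P).1 (pvPassP 4 t P).2).2).1
          (pvPassP 2 (pvPassP 3 (pvPassP 4 t P).1 (pvPassP 4 t P).2).1
            (pvPassP 3 (pvPassP 4 t P).1 (pvPassP 4 t P).2).2).2).1 := by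
    show pvMultiFrom 4 t P = _
    norm_num [pvMultiFrom]
  simp [put_parentheses, e4, e3, e2, e1, hmulti]

theorem pv_B_wf (t : String) (P : List (String × String)) (ht : pvIsOp t = false)
    (hP : pvGoodP P) : put_parentheses_alt (t :: pvFlat P) = pvMulti t P := by
  have hget : PRECEDENCE.get? t = none := by rw [pv_precLookup]; simp [ht]
  have h0 : pvSyLoop (t :: pvFlat P) [] [] = pvSyLoop (pvFlat P) ([] ++ [t]) [] := by
    simp [pvSyLoop, hget]
  have hmain := pv_syMain P [] [] t hP rfl (by intro q hq; simp at hq) (by simp)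
  have := congrArg (fun x => x.getD "") hmain
  simpa [put_parentheses_alt, h0, pvChain] using this

-- ===== VERDICT (by name: the statement is the Claim_ definition above) =====
theorem put_parentheses_spec : Claim_equal_put_parentheses := by
  intro formula _ hpre
  unfold Spec_put_parentheses
  rcases hpre with ⟨hne, hall⟩ | hwf
  · obtain ⟨h, rest, rfl⟩ : ∃ h rest, formula = h :: rest := by
      cases formula with
      | nil => exact absurd rfl hne
      | cons h rest => exact ⟨h, rest, rfl⟩
    have n4 := pv_passA_noop 4 (h :: rest) [] hall
    have n3 := pv_passA_noop 3 (h :: rest) [] hall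
    have n2 := pv_passA_noop 2 (h :: rest) [] hall
    have n1 := pv_passA_noop 1 (h :: rest) [] hall
    simp only [List.reverse_nil, List.nil_append] at n4 n3 n2 n1
    have hA : put_parentheses (h :: rest) = h := by
      simp [put_parentheses, n4, n3, n2, n1]
    have hB : put_parentheses_alt (h :: rest) = h := by
      have hsl := pv_syLoop_noop (h :: rest) [] hall
      simp [put_parentheses_alt, hsl, pvFlush]
    rw [hA, hB]
  · obtain ⟨t, P, rfl, ht, hg⟩ := pv_wf_struct formula hwf
    rw [pv_A_wf t P ht hg, pv_B_wf t P ht hg]
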